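-- pv_equiv track=rewrite | github.com/rishuramani/RC | marketing-bot/src/agents/twitter_agent.py | _parse_thread
-- ===== SOURCE A (Python) =====
-- def _parse_thread(response: str) -> list[str]:
--     """Parse a thread response into individual tweets."""
--     tweets = []
--     current_tweet = []
--
--     for line in response.strip().split("\n"):
--         stripped = line.strip()
--         # Check if this line starts a new numbered tweet
--         if stripped and (
--             stripped[0].isdigit() and "/" in stripped[:4]
--         ):
--             if current_tweet:
--                 tweets.append("\n".join(current_tweet).strip())
--             current_tweet = [stripped]
--         elif stripped:
--             current_tweet.append(stripped)
--
--     if current_tweet: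
--         tweets.append("\n".join(current_tweet).strip())
--
--     # If no numbered format detected, treat the whole response as one tweet
--     if not tweets:
--         tweets = [response.strip()]
--
--     return tweets
-- ===== SOURCE B (Python) =====
-- def _starts_tweet(line: str) -> bool:
--     """A stripped line opens a numbered tweet: digit first, '/' among its first 4 chars."""
--     return line[0].isdigit() and "/" in line[:4]
--
--
-- def _parse_thread(response: str) -> list[str]:
--     """Parse a thread response into individual tweets (chunk-splitting version)."""
--     lines = [s for s in (ln.strip() for ln in response.strip().split("\n")) if s]
--     if not lines:
--         return [response.strip()]
--     tweets = []
--     rest = lines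
--     if not _starts_tweet(rest[0]):
--         # the lines before the first numbered line form one tweet of their own
--         k = next((i for i, l in enumerate(rest) if _starts_tweet(l)), len(rest))
--         tweets.append("\n".join(rest[:k]).strip())
--         rest = rest[k:]
--     while rest:
--         k = next((i for i, l in enumerate(rest[1:], 1) if _starts_tweet(l)), len(rest))
--         tweets.append("\n".join(rest[:k]).strip())
--         rest = rest[k:]
--     return tweets
-- ===== Notes on version B (the rewrite author's own statement) =====
-- stated objective: alternative
-- what changed: Replaces A's single fold that threads a tweets/current_tweet accumulator pair with: filter the stripped non-empty lines once, emit the pre-boundary prefix as one tweet, then repeatedly split off a maximal chunk at the next boundary line (chunk-splitting instead of per-line accumulation).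
import Mathlib
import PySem

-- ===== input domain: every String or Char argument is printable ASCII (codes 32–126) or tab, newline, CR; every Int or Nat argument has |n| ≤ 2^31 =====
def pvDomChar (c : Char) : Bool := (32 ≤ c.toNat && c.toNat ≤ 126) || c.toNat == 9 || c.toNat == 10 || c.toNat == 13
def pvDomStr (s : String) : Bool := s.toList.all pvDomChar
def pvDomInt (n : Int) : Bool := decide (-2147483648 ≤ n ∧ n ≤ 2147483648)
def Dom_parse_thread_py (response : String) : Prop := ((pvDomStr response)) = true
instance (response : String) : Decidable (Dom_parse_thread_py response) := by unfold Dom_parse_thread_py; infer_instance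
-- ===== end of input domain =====

-- B replaces A's accumulator fold with filter-then-chunk-splitting at boundary lines; same cost, different decomposition.

-- shared helper: the boundary test both Pythons apply to an (always non-empty) stripped line
def pvBnd (s : List Char) : Bool :=
  (match PySem.Chars.pyGet? s (0 : Int) with
   | some c => PySem.Chars.isdigit c
   | none => false) &&
  PySem.Chars.isIn ['/'] (PySem.Chars.slice s none (some 4))

-- ===== PORT A =====
def parse_thread_py (response : String) : List String :=
  let lines := PySem.Chars.splitOn (PySem.Chars.strip response.toList) ['\n']
  let step := fun (acc : List (List Char) × List (List Char)) (line : List Char) =>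
    let stripped := PySem.Chars.strip line
    if !stripped.isEmpty && pvBnd stripped then
      ((if !acc.2.isEmpty then acc.1 ++ [PySem.Chars.strip (PySem.Chars.join ['\n'] acc.2)] else acc.1),
       [stripped])
    else if !stripped.isEmpty then
      (acc.1, acc.2 ++ [stripped])
    else acc
  let r := lines.foldl step ([], [])
  let tweets := if !r.2.isEmpty then r.1 ++ [PySem.Chars.strip (PySem.Chars.join ['\n'] r.2)] else r.1
  let tweets := if tweets.isEmpty then [PySem.Chars.strip response.toList] else tweets
  tweets.map String.ofList

-- ===== PORT B =====
-- the while loop of Source B: split off a maximal chunk (head line plus following non-boundary lines)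
def pvChunks (rest : List (List Char)) : List (List Char) :=
  match rest with
  | [] => []
  | x :: xs =>
    let k := 1 + xs.findIdx pvBnd
    PySem.Chars.strip (PySem.Chars.join ['\n'] ((x :: xs).take k)) :: pvChunks ((x :: xs).drop k)
termination_by rest.length
decreasing_by
  simp only [List.length_drop, List.length_cons]
  omega

def parse_thread_py_alt (response : String) : List String :=
  let lines := ((PySem.Chars.splitOn (PySem.Chars.strip response.toList) ['\n']).map
      PySem.Chars.strip).filter (fun s => !s.isEmpty)
  match lines with
  | [] => [String.ofList (PySem.Chars.strip response.toList)]
  | x :: xs =>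
    let pre :=
      if !pvBnd x then
        let k := (x :: xs).findIdx pvBnd
        ([PySem.Chars.strip (PySem.Chars.join ['\n'] ((x :: xs).take k))],
         (x :: xs).drop k)
      else ([], x :: xs)
    (pre.1 ++ pvChunks pre.2).map String.ofList

-- ===== PRECONDITION & SPEC =====
def Spec_parse_thread_py (response : String) (out : List String) : Prop := out = parse_thread_py_alt response
instance (response : String) (out : List String) : Decidable (Spec_parse_thread_py response out) := by unfold Spec_parse_thread_py; infer_instance

-- ===== CLAIM (what is proved, stated in full; the proofs are below) =====
def Claim_equal_parse_thread_py : Prop := ∀ (response : String), Dom_parse_thread_py response → Spec_parse_thread_py response (parse_thread_py response)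

-- ===== LEMMAS AND PROOFS =====

-- proof-side abbreviations
def pvT (c : List (List Char)) : List Char := PySem.Chars.strip (PySem.Chars.join ['\n'] c)

def pvStepF (acc : List (List Char) × List (List Char)) (x : List Char) :
    List (List Char) × List (List Char) :=
  if pvBnd x then
    ((if !acc.2.isEmpty then acc.1 ++ [pvT acc.2] else acc.1), [x])
  else (acc.1, acc.2 ++ [x])

def pvChunksWith (c : List (List Char)) : List (List Char) → List (List Char)
  | [] => if !c.isEmpty then [pvT c] else []
  | x :: xs =>
    if pvBnd x then (if !c.isEmpty then [pvT c] else []) ++ pvChunksWith [x] xs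
    else pvChunksWith (c ++ [x]) xs

def pvStepA (acc : List (List Char) × List (List Char)) (line : List Char) :
    List (List Char) × List (List Char) :=
  let stripped := PySem.Chars.strip line
  if !stripped.isEmpty && pvBnd stripped then
    ((if !acc.2.isEmpty then acc.1 ++ [PySem.Chars.strip (PySem.Chars.join ['\n'] acc.2)] else acc.1),
     [stripped])
  else if !stripped.isEmpty then
    (acc.1, acc.2 ++ [stripped])
  else acc

theorem pv_filter_fold (lines : List (List Char)) (acc : List (List Char) × List (List Char)) :
    lines.foldl pvStepA acc
      = ((lines.map PySem.Chars.strip).filter (fun s => !s.isEmpty)).foldl pvStepF acc := by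
  induction lines generalizing acc with
  | nil => rfl
  | cons a l ih =>
    by_cases h : (PySem.Chars.strip a).isEmpty
    · simp [h, pvStepA, ih]
    · have hstep : pvStepA acc a = pvStepF acc (PySem.Chars.strip a) := by
        simp [pvStepA, pvStepF, pvT, h]
      simp [h, hstep, ih]

def pvFlush (acc : List (List Char) × List (List Char)) : List (List Char) :=
  if !acc.2.isEmpty then acc.1 ++ [pvT acc.2] else acc.1

theorem pv_fold_chunksWith (L : List (List Char)) (t c : List (List Char)) :
    pvFlush (L.foldl pvStepF (t, c)) = t ++ pvChunksWith c L := by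
  induction L generalizing t c with
  | nil => simp [pvFlush, pvChunksWith]; split <;> simp
  | cons x xs ih =>
    simp only [List.foldl_cons, pvChunksWith]
    by_cases hb : pvBnd x
    · simp only [pvStepF, hb, if_pos, ih]
      split <;> simp
    · simp [pvStepF, hb, ih]

theorem pv_take_findIdx {α : Type} (p : α → Bool) (l : List α) :
    l.take (l.findIdx p) = l.takeWhile (fun a => !p a) := by
  induction l with
  | nil => rfl
  | cons a l ih =>
    by_cases h : p a <;> simp [List.findIdx_cons, h, ih]

theorem pv_drop_findIdx {α : Type} (p : α → Bool) (l : List α) :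
    l.drop (l.findIdx p) = l.dropWhile (fun a => !p a) := by
  induction l with
  | nil => rfl
  | cons a l ih =>
    by_cases h : p a <;> simp [List.findIdx_cons, h, ih]

theorem pvChunks_cons (x : List Char) (xs : List (List Char)) :
    pvChunks (x :: xs)
      = pvT (x :: xs.takeWhile (fun a => !pvBnd a))
          :: pvChunks (xs.dropWhile (fun a => !pvBnd a)) := by
  rw [pvChunks]
  have h1 : (1 + xs.findIdx pvBnd) = (xs.findIdx pvBnd) + 1 := Nat.add_comm _ _
  rw [h1]
  simp [pvT, pv_take_findIdx, pv_drop_findIdx]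

theorem pv_chunksWith_eq (L : List (List Char)) (c : List (List Char)) (hc : c ≠ []) :
    pvChunksWith c L
      = pvT (c ++ L.takeWhile (fun a => !pvBnd a))
          :: pvChunks (L.dropWhile (fun a => !pvBnd a)) := by
  induction L generalizing c with
  | nil => simp [pvChunksWith, hc, pvChunks]
  | cons x xs ih =>
    by_cases hb : pvBnd x
    · simp only [pvChunksWith, hb, if_pos, List.takeWhile_cons, List.dropWhile_cons,
        Bool.not_true, Bool.false_eq_true, if_false]
      rw [ih [x] (by simp)]
      simp [hc, pvChunks_cons]
    · simp only [pvChunksWith, hb, if_neg, List.takeWhile_cons, List.dropWhile_cons,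
        Bool.not_false, if_true, Bool.false_eq_true, not_false_eq_true]
      rw [ih (c ++ [x]) (by simp)]
      simp

-- ===== VERDICT (by name: the statement is the Claim_ definition above) =====
theorem parse_thread_py_spec : Claim_equal_parse_thread_py := by
  intro response _
  unfold Spec_parse_thread_py parse_thread_py parse_thread_py_alt
  simp only []
  rw [show (fun (acc : List (List Char) × List (List Char)) (line : List Char) =>
        let stripped := PySem.Chars.strip line
        if !stripped.isEmpty && pvBnd stripped then
          ((if !acc.2.isEmpty then acc.1 ++ [PySem.Chars.strip (PySem.Chars.join ['\n'] acc.2)] else acc.1),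
           [stripped])
        else if !stripped.isEmpty then
          (acc.1, acc.2 ++ [stripped])
        else acc) = pvStepA from rfl]
  rw [pv_filter_fold]
  set L := ((PySem.Chars.splitOn (PySem.Chars.strip response.toList) ['\n']).map
      PySem.Chars.strip).filter (fun s => !s.isEmpty) with hL
  have hflush : ∀ (r : List (List Char) × List (List Char)),
      (if !r.2.isEmpty then r.1 ++ [PySem.Chars.strip (PySem.Chars.join ['\n'] r.2)] else r.1)
        = pvFlush r := by intro r; simp [pvFlush, pvT]
  rw [hflush]
  rw [pv_fold_chunksWith]
  match L with
  | [] => simp [pvChunksWith]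
  | x :: xs =>
    have hcw : pvChunksWith ([] : List (List Char)) (x :: xs) = pvChunksWith [x] xs := by
      by_cases hb : pvBnd x <;> simp [pvChunksWith, hb]
    rw [hcw, pv_chunksWith_eq xs [x] (by simp)]
    by_cases hb : pvBnd x
    · simp [hb, pvChunks_cons, pvT]
    · simp [hb, List.findIdx_cons, pv_take_findIdx, pv_drop_findIdx, pvT]
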